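-- pv_equiv track=rewrite | github.com/PraveenSakthivel/KP_Poker | poker.py | card_graphic
-- ===== SOURCE A (Python) =====
-- import math
--
-- def card_graphic(cards):
--     suits = ["♠","♣", "♥","♦"]
--     ranks = ["A","2","3","4","5","6","7","8","9","10","J","Q","K"]
--     top_line=suit_line=rank_line=bottom_line = ""
--     for card in cards:
--
--         suit = math.floor(card / 13)
--         rank = card % 13
--         color = 37 #Set initial color to black
--         if  card > 25: #If card is a red card set color to red
--             color = 31
--
--         top_line += "\033[1;{0};40m".format(color)
--         suit_line += "\033[1;{0};40m".format(color)
--         rank_line += "\033[1;{0};40m".format(color)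
--         bottom_line += "\033[1;{0};40m".format(color)
--
--         if card == -1: #Show a blank card
--             top_line += " ___     "
--             suit_line += "|   |    "
--             rank_line += "|   |    "
--             bottom_line += "|___|    "
--             continue
--
--
--         top_line += " ___ ".format(color)
--         suit_line  += "|{1}  |".format(color,suits[suit])
--         if rank % 13 == 9: #Check if rank is 10, then we need to remove a space
--             rank_line += "| {1}|".format(color,ranks[rank])
--         else:
--             rank_line += "| {1} |".format(color,ranks[rank])
--         bottom_line += "|___|".format(color)
--
--         top_line += "    "
--         suit_line += "    "
--         rank_line += "    "
--         bottom_line += "    "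
--
--     top_line += "\n"
--     suit_line += "\n"
--     rank_line += "\n"
--     bottom_line += "\n\033[0;37;40m"
--     return top_line + suit_line + rank_line + bottom_line
-- ===== SOURCE B (Python) =====
-- SUITS = ["\u2660", "\u2663", "\u2665", "\u2666"]
-- RANKS = ["A", "2", "3", "4", "5", "6", "7", "8", "9", "10", "J", "Q", "K"]
-- BLANK = [" ___     ", "|   |    ", "|   |    ", "|___|    "]
--
--
-- def _cell(i, c):
--     """The 9-character body of card c on output row i."""
--     if c == -1:
--         return BLANK[i]
--     if i == 0:
--         return " ___     "
--     if i == 1: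
--         return "|" + SUITS[c // 13] + "  |    "
--     if i == 2:
--         return "| " + RANKS[c % 13] + ("|    " if c % 13 == 9 else " |    ")
--     return "|___|    "
--
--
-- def card_graphic(cards):
--     # Line-major rendering: walk the four rows, emitting tokens into a single
--     # flat list, then join once at the end.
--     parts = []
--     for i in range(4):
--         for c in cards:
--             parts.append("\033[1;31;40m" if c > 25 else "\033[1;37;40m")
--             parts.append(_cell(i, c))
--         parts.append("\n")
--     parts.append("\033[0;37;40m")
--     return "".join(parts)
-- ===== Notes on version B (the rewrite author's own statement) =====
-- stated objective: alternative
-- what changed: A makes one card-major pass growing four parallel string accumulators; B renders line-major: an outer loop over the four rows with an inner loop over the cards emits tokens (color prefix + 9-char row cell from a per-row table function) into one flat list, joined once at the end.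
import Mathlib
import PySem

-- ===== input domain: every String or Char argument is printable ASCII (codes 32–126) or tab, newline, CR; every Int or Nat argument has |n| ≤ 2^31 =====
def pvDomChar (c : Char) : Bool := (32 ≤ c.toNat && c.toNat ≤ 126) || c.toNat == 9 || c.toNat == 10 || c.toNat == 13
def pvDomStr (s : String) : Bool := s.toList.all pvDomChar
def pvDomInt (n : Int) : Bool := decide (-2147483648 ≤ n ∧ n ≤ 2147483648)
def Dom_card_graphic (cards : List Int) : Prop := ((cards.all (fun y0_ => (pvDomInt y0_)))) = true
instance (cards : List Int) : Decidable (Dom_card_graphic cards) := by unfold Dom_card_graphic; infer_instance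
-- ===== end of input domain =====

-- B renders the same ANSI card graphic line-major (outer loop over the four rows,
-- inner loop over cards, one flat token list joined once) instead of A's single
-- card-major loop over four growing string accumulators.


-- ===== PORT A =====
def pvSuits : List String := ["♠", "♣", "♥", "♦"]
def pvRanks : List String := ["A","2","3","4","5","6","7","8","9","10","J","Q","K"]

-- one iteration of A's loop, threading the four accumulators
def cardStepA (st : String × String × String × String) (card : Int) :
    String × String × String × String :=
  let suit := PySem.Int.floordiv card 13
  let rank := PySem.Int.mod card 13
  let color : Int := if card > 25 then 31 else 37
  let pre := "\x1b[1;" ++ PySem.Int.toStr color ++ ";40m"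
  let tl := st.1 ++ pre
  let sl := st.2.1 ++ pre
  let rl := st.2.2.1 ++ pre
  let bl := st.2.2.2 ++ pre
  if card = -1 then
    (tl ++ " ___     ", sl ++ "|   |    ", rl ++ "|   |    ", bl ++ "|___|    ")
  else
    let tl := tl ++ " ___ "
    let sl := sl ++ "|" ++ ((PySem.List.pyGet? pvSuits suit).getD "") ++ "  |"
    let rl :=
      if PySem.Int.mod rank 13 = 9 then
        rl ++ "| " ++ ((PySem.List.pyGet? pvRanks rank).getD "") ++ "|"
      else
        rl ++ "| " ++ ((PySem.List.pyGet? pvRanks rank).getD "") ++ " |"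
    let bl := bl ++ "|___|"
    (tl ++ "    ", sl ++ "    ", rl ++ "    ", bl ++ "    ")

def card_graphic (cards : List Int) : String :=
  let st := cards.foldl cardStepA ("", "", "", "")
  (st.1 ++ "\n") ++ (st.2.1 ++ "\n") ++ (st.2.2.1 ++ "\n") ++ (st.2.2.2 ++ "\n\x1b[0;37;40m")

-- ===== PORT B =====
def pvBlank : List String := [" ___     ", "|   |    ", "|   |    ", "|___|    "]

-- the 9-character body of card c on output row i
def pvCell (i : Int) (c : Int) : String :=
  if c = -1 then (PySem.List.pyGet? pvBlank i).getD ""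
  else if i = 0 then " ___     "
  else if i = 1 then "|" ++ ((PySem.List.pyGet? pvSuits (PySem.Int.floordiv c 13)).getD "") ++ "  |    "
  else if i = 2 then
    "| " ++ ((PySem.List.pyGet? pvRanks (PySem.Int.mod c 13)).getD "") ++
      (if PySem.Int.mod c 13 = 9 then "|    " else " |    ")
  else "|___|    "

def pvPre (c : Int) : String := if c > 25 then "\x1b[1;31;40m" else "\x1b[1;37;40m"

def card_graphic_alt (cards : List Int) : String :=
  let parts := (PySem.List.pyRange 0 4 1).foldl
    (fun acc i => (cards.foldl (fun a c => a ++ [pvPre c, pvCell i c]) acc) ++ ["\n"]) []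
  String.join (parts ++ ["\x1b[0;37;40m"])

-- ===== PRECONDITION & SPEC =====
-- Pre_ excludes exactly the inputs on which A raises IndexError (suits[card // 13] with
-- card ≥ 52 or card ≤ -53); on every input admitted below A returns normally.
def Pre_card_graphic (cards : List Int) : Prop :=
  ∀ c ∈ cards, -52 ≤ c ∧ c ≤ 51
instance (cards : List Int) : Decidable (Pre_card_graphic cards) := by
  unfold Pre_card_graphic; infer_instance

def pvWitness_card_graphic : List Int := [-1, 9, 26, 51]

def Spec_card_graphic (cards : List Int) (out : String) : Prop := out = card_graphic_alt cards
instance (cards : List Int) (out : String) : Decidable (Spec_card_graphic cards out) := by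
  unfold Spec_card_graphic; infer_instance

-- ===== CLAIM (what is proved, stated in full; the proofs are below) =====
def Claim_equal_card_graphic : Prop := ∀ (cards : List Int), Dom_card_graphic cards → Pre_card_graphic cards → Spec_card_graphic cards (card_graphic cards)

-- ===== LEMMAS AND PROOFS =====

-- A's loop body appends exactly the row fragment pvPre c ++ pvCell i c on each row
theorem cardStepA_eq_cells (st : String × String × String × String) (card : Int) :
    cardStepA st card =
      (st.1 ++ (pvPre card ++ pvCell 0 card), st.2.1 ++ (pvPre card ++ pvCell 1 card),
       st.2.2.1 ++ (pvPre card ++ pvCell 2 card), st.2.2.2 ++ (pvPre card ++ pvCell 3 card)) := by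
  have hp37 : ("\x1b[1;" : String) ++ PySem.Int.toStr 37 ++ ";40m" = "\x1b[1;37;40m" := by decide
  have hp31 : ("\x1b[1;" : String) ++ PySem.Int.toStr 31 ++ ";40m" = "\x1b[1;31;40m" := by decide
  have h913 : PySem.Int.mod (9 : Int) 13 = 9 := by decide
  have m2 : ("  |" : String) ++ "    " = "  |    " := by decide
  have m4 : ("|" : String) ++ "    " = "|    " := by decide
  have m5 : (" |" : String) ++ "    " = " |    " := by decide
  have g1 : ∀ X : String, "\x1b[1;31;40m" ++ ("|" ++ X) = "\x1b[1;31;40m|" ++ X :=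
    fun X => by rw [← String.append_assoc]; rfl
  have g2 : ∀ X : String, "\x1b[1;37;40m" ++ ("|" ++ X) = "\x1b[1;37;40m|" ++ X :=
    fun X => by rw [← String.append_assoc]; rfl
  have g3 : ∀ X : String, "\x1b[1;31;40m" ++ ("| " ++ X) = "\x1b[1;31;40m| " ++ X :=
    fun X => by rw [← String.append_assoc]; rfl
  have g4 : ∀ X : String, "\x1b[1;37;40m" ++ ("| " ++ X) = "\x1b[1;37;40m| " ++ X :=
    fun X => by rw [← String.append_assoc]; rfl
  have hmm : PySem.Int.mod (PySem.Int.mod card 13) 13 = PySem.Int.mod card 13 := by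
    simp only [PySem.Int.mod_eq_emod_of_pos (show (0:Int) < 13 by norm_num)]
    exact Int.emod_emod_of_dvd _ dvd_rfl
  unfold cardStepA pvCell pvPre
  by_cases h1 : card = -1
  · subst h1
    simp only [show ¬((-1 : Int) > 25) from by decide, ite_true, ite_false]
    rw [hp37]
    simp [pvBlank, PySem.List.pyGet?, PySem.List.pyIdx?, String.append_assoc]
  · by_cases h25 : card > 25 <;> by_cases h9 : PySem.Int.mod card 13 = 9 <;>
      simp only [h1, h25, h9, hmm, h913, if_true, if_false] <;>
      (first | rw [hp31] | rw [hp37]) <;>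
      simp [String.append_assoc, m2, m4, m5, g1, g2, g3, g4]

theorem strFoldlAppend (l : List String) (x : String) :
    List.foldl (fun r s => r ++ s) x l = x ++ List.foldl (fun r s => r ++ s) "" l := by
  induction l generalizing x with
  | nil => simp
  | cons a t ih => rw [List.foldl_cons, List.foldl_cons, ih (x ++ a), ih ((""  : String) ++ a)]
                   simp [String.append_assoc]

theorem strJoin_cons (a : String) (l : List String) :
    String.join (a :: l) = a ++ String.join l := by
  simp only [String.join, List.foldl_cons]
  exact strFoldlAppend l (("" : String) ++ a) |>.trans (by simp)

theorem strJoin_append (l1 l2 : List String) :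
    String.join (l1 ++ l2) = String.join l1 ++ String.join l2 := by
  induction l1 with
  | nil => simp [String.join]
  | cons a t ih => simp [strJoin_cons, ih, String.append_assoc]

-- per-row result of A's fold: each accumulator collects the row fragments in order
theorem foldl_stepA_eq (cards : List Int) (t s r b : String) :
    cards.foldl cardStepA (t, s, r, b) =
      (t ++ String.join (cards.map (fun c => pvPre c ++ pvCell 0 c)),
       s ++ String.join (cards.map (fun c => pvPre c ++ pvCell 1 c)),
       r ++ String.join (cards.map (fun c => pvPre c ++ pvCell 2 c)),
       b ++ String.join (cards.map (fun c => pvPre c ++ pvCell 3 c))) := by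
  induction cards generalizing t s r b with
  | nil => simp [String.join]
  | cons c cs ih =>
    simp only [List.foldl_cons, cardStepA_eq_cells, List.map_cons, strJoin_cons]
    rw [ih]
    simp [String.append_assoc]

-- B's inner loop flattens to the token list of one row
theorem foldl_tokens_eq (cards : List Int) (i : Int) (acc : List String) :
    cards.foldl (fun a c => a ++ [pvPre c, pvCell i c]) acc =
      acc ++ cards.flatMap (fun c => [pvPre c, pvCell i c]) := by
  induction cards generalizing acc with
  | nil => simp
  | cons c cs ih => simp [ih]

theorem strJoin_tokens (cards : List Int) (i : Int) :
    String.join (cards.flatMap (fun c => [pvPre c, pvCell i c])) =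
      String.join (cards.map (fun c => pvPre c ++ pvCell i c)) := by
  induction cards with
  | nil => rfl
  | cons c cs ih => simp [strJoin_cons, ih, String.append_assoc]

-- ===== VERDICT (by name: the statement is the Claim_ definition above) =====
theorem card_graphic_spec : Claim_equal_card_graphic := by
  intro cards _ _
  unfold Spec_card_graphic card_graphic card_graphic_alt
  rw [show PySem.List.pyRange 0 4 1 = [0,1,2,3] from by decide]
  simp only [List.foldl_cons, List.foldl_nil, foldl_tokens_eq, List.nil_append,
    List.append_assoc, foldl_stepA_eq, strJoin_append, strJoin_tokens, strJoin_cons]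
  simp [String.join, String.append_assoc]
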